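-- pv_equiv track=rewrite | github.com/MachtaYassine/NLP_GliNER | src/app/app.py | deduplicate_entities_majority_voting
-- ===== SOURCE A (Python) =====
-- from collections import Counter, defaultdict
--
-- def deduplicate_entities_majority_voting(entities):
--     """
--     For a list of entities (dicts with 'text' and 'label'),
--     deduplicate by majority voting on the label for each unique text.
--     """
--     entity_types = defaultdict(list)
--     for ent in entities:
--         entity_types[ent['text']].append(ent['label'])
--     deduped = []
--     for text, labels in entity_types.items():
--         most_common = Counter(labels).most_common(1)[0][0]
--         deduped.append({'text': text, 'label': most_common})
--     return deduped
-- ===== SOURCE B (Python) =====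
-- def deduplicate_entities_majority_voting(entities):
--     """
--     Dict-free nested-scan alternative: walk the entities once; at the first
--     appearance of each text, scan the whole list for that text's labels and
--     take max(labels, key=labels.count), which is the first label (in
--     occurrence order) with the maximal count -- the same winner Counter's
--     most_common(1) picks.
--     """
--     deduped = []
--     seen = []
--     for ent in entities:
--         text = ent['text']
--         if text in seen:
--             continue
--         seen.append(text)
--         labels = [e['label'] for e in entities if e['text'] == text]
--         deduped.append({'text': text, 'label': max(labels, key=labels.count)})
--     return deduped
-- ===== Notes on version B (the rewrite author's own statement) =====
-- stated objective: alternative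
-- what changed: Replaces A's dict-of-lists grouping plus per-group Counter(...).most_common(1) with a dict-free nested scan: for each first-appearance text it rescans the entity list to collect that text's labels and picks the first maximal one with max(labels, key=labels.count), trading the hash tables for quadratic list scans.
import Mathlib
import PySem

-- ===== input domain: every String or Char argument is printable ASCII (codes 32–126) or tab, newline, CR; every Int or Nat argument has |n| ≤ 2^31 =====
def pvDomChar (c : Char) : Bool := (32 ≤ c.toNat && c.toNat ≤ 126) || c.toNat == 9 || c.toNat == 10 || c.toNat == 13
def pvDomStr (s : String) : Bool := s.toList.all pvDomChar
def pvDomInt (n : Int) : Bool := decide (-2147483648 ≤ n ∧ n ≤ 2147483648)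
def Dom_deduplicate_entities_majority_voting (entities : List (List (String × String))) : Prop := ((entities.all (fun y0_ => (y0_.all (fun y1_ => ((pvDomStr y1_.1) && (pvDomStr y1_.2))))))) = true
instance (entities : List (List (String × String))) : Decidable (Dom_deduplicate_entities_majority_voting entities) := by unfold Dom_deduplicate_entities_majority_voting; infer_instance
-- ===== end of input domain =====

-- B replaces A's dict-of-lists grouping plus per-group Counter.most_common(1) with a dict-free
-- nested scan: at each first-appearance text it rescans the list for that text's labels and takes
-- the first maximal-count one via max(labels, key=labels.count) (objective: alternative).

-- ===== PORT A =====
-- ent['key'] on the assoc-list encoding of a Python dict: build the dict (later pairs overwrite)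
-- and look up; the "" default is unreachable under Pre_ (Python raises KeyError exactly there).
def entGet (ent : List (String × String)) (k : String) : String :=
  (PySem.Dict.ofList ent).getD k ""

-- Counter(labels).most_common(1)[0][0]: most_common is the stable descending sort of the counter's
-- items by count (heapq.nlargest ties resolve by counter insertion order, exactly the stable
-- reverse sort); the "" branch is the [0] IndexError case, unreachable since every grouped label
-- list A builds is nonempty.
def mostCommon1 (labels : List String) : String :=
  match PySem.List.sorted (PySem.Dict.counter labels).items (fun p => p.2) true with
  | [] => ""
  | p :: _ => p.1

def deduplicate_entities_majority_voting (entities : List (List (String × String))) : List (List (String × String)) :=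
  let entity_types := entities.foldl
    (fun d ent => d.modify (entGet ent "text") [] (fun ls => ls ++ [entGet ent "label"]))
    PySem.Dict.empty
  entity_types.items.foldl
    (fun deduped p => deduped ++ [[("text", p.1), ("label", mostCommon1 p.2)]]) []

-- ===== PORT B =====
-- max(labels, key=labels.count) is PySem.List.maxD (first maximal element); its "" default is the
-- empty-list case, unreachable since the scanned text occurs in the list.
def deduplicate_entities_majority_voting_alt (entities : List (List (String × String))) : List (List (String × String)) :=
  (entities.foldl
    (fun st ent =>
      let text := entGet ent "text"
      if st.2.contains text then st
      else
        let labels := (entities.filter (fun e => entGet e "text" == text)).map (fun e => entGet e "label")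
        (st.1 ++ [[("text", text), ("label", PySem.List.maxD labels (fun l => (labels.count l : Int)) "")]],
         st.2 ++ [text]))
    (([] : List (List (String × String))), ([] : List String))).1

-- ===== PRECONDITION & SPEC =====
-- Pre_ excludes exactly the inputs where Python A raises KeyError: an entity dict missing the
-- 'text' or 'label' key.
def Pre_deduplicate_entities_majority_voting (entities : List (List (String × String))) : Prop :=
  ∀ ent ∈ entities, (PySem.Dict.ofList ent).contains "text" = true ∧ (PySem.Dict.ofList ent).contains "label" = true
instance (entities : List (List (String × String))) : Decidable (Pre_deduplicate_entities_majority_voting entities) := by unfold Pre_deduplicate_entities_majority_voting; infer_instance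

def pvWitness_deduplicate_entities_majority_voting : (List (List (String × String))) :=
  [[("text", "Paris"), ("label", "LOC")], [("text", "Paris"), ("label", "PER")], [("text", "Paris"), ("label", "LOC")], [("text", "Lee"), ("label", "PER")]]

def Spec_deduplicate_entities_majority_voting (entities : List (List (String × String))) (out : List (List (String × String))) : Prop := out = deduplicate_entities_majority_voting_alt entities
instance (entities : List (List (String × String))) (out : List (List (String × String))) : Decidable (Spec_deduplicate_entities_majority_voting entities out) := by unfold Spec_deduplicate_entities_majority_voting; infer_instance

-- ===== CLAIM (what is proved, stated in full; the proofs are below) =====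
def Claim_equal_deduplicate_entities_majority_voting : Prop := ∀ (entities : List (List (String × String))), Dom_deduplicate_entities_majority_voting entities → Pre_deduplicate_entities_majority_voting entities → Spec_deduplicate_entities_majority_voting entities (deduplicate_entities_majority_voting entities)

-- ===== LEMMAS AND PROOFS =====

-- most_common(1)[0][0] is the head of the stable reverse sort = the first count-maximal item
lemma head?_insertBy {α : Type} (p : α → α → Bool) (x : α) (ys : List α) :
    (PySem.List.insertBy p x ys).head? =
      some (match ys with | [] => x | y :: _ => if p x y then x else y) := by
  cases ys with
  | nil => rfl
  | cons y t =>
    show (if p x y then x :: y :: t else y :: PySem.List.insertBy p x t).head? = _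
    by_cases h : p x y <;> simp [h]

lemma head?_foldl_insertBy {α : Type} (p : α → α → Bool) (xs : List α) (acc : List α) :
    (xs.foldl (fun acc x => PySem.List.insertBy p x acc) acc).head? =
      xs.foldl (fun m x => match m with
        | none => some x
        | some h => if p x h then some x else some h) acc.head? := by
  induction xs generalizing acc with
  | nil => rfl
  | cons x t ih =>
    simp only [List.foldl_cons]
    rw [ih, head?_insertBy]
    congr 1
    cases acc with
    | nil => rfl
    | cons y _ => by_cases h : p x y <;> simp [h]

lemma head?_sorted_rev {α κ : Type} [LT κ] [DecidableLT κ] (xs : List α) (key : α → κ) :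
    (PySem.List.sorted xs key true).head? = PySem.List.max? xs key := by
  rw [PySem.List.sorted_rev_eq_foldl_insertBy, head?_foldl_insertBy]
  show _ = xs.foldl _ none
  congr 1
  funext m x
  cases m with
  | none => rfl
  | some h => by_cases hc : key h < key x <;> simp [hc]

lemma max?_map {α β κ : Type} [LT κ] [DecidableLT κ] (f : α → β) (l : List α) (key : β → κ) :
    PySem.List.max? (l.map f) key = (PySem.List.max? l (fun a => key (f a))).map f := by
  show (l.map f).foldl _ none = _
  rw [List.foldl_map]
  have : ∀ (l : List α) (m : Option α),
      l.foldl (fun acc x => match acc with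
        | none => some (f x)
        | some h => if key h < key (f x) then some (f x) else some h) (m.map f) =
      (l.foldl (fun acc x => match acc with
        | none => some x
        | some h => if key (f h) < key (f x) then some x else some h) m).map f := by
    intro l
    induction l with
    | nil => intro m; rfl
    | cons x t ih =>
      intro m
      simp only [List.foldl_cons]
      cases m with
      | none => exact ih (some x)
      | some h =>
        by_cases hc : key (f h) < key (f x) <;> simp only [Option.map_some, hc, if_true, if_false] <;>
          [exact ih (some x); exact ih (some h)]
  exact this l none

-- deduplicating a list does not change its first count-maximal element
lemma max?_ofList {α : Type} [BEq α] [LawfulBEq α] (ls : List α) (key : α → Int) :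
    PySem.List.max? (PySem.Set.ofList ls) key = PySem.List.max? ls key := by
  induction ls using List.reverseRecOn with
  | nil => rfl
  | append_singleton xs x ih =>
    have hstep : ∀ (l : List α), PySem.List.max? (l ++ [x]) key =
        (match PySem.List.max? l key with
          | none => some x
          | some h => if key h < key x then some x else some h) := by
      intro l
      show (l ++ [x]).foldl _ none = _
      rw [List.foldl_append]
      rfl
    rw [PySem.Set.ofList_append_singleton, PySem.Set.add_eq_ite, hstep]
    by_cases hx : x ∈ PySem.Set.ofList xs
    · simp only [hx, if_true, ih]
      have hmem : x ∈ xs := (PySem.Set.mem_ofList xs x).1 hx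
      rcases hm : PySem.List.max? xs key with _ | m
      · rw [(PySem.List.max?_eq_none_iff xs key).1 hm] at hmem; cases hmem
      · have hle := PySem.List.max?_isMax hm x hmem
        simp [not_lt.2 hle]
    · simp only [hx, if_false, hstep, ih]

lemma mostCommon1_eq_maxD (ls : List String) :
    mostCommon1 ls = PySem.List.maxD ls (fun l => (ls.count l : Int)) "" := by
  have h1 : mostCommon1 ls =
      (((PySem.List.sorted (PySem.Dict.counter ls).items (fun p => p.2) true).head?).map (fun p => p.1)).getD "" := by
    unfold mostCommon1
    cases PySem.List.sorted (PySem.Dict.counter ls).items (fun p => p.2) true <;> rfl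
  rw [h1, head?_sorted_rev, PySem.Dict.items_counter, max?_map, Option.map_map]
  have hid : ((fun p : String × Int => p.1) ∘ fun k : String => (k, (ls.count k : Int))) = id := rfl
  rw [hid, Option.map_id, max?_ofList]
  rfl

-- the texts B's 'seen' loop adds while scanning l, given the texts already seen
def pvNew (tx : List (String × String) → String) : List (List (String × String)) → List String → List String
  | [], _ => []
  | e :: l, seen => if seen.contains (tx e) then pvNew tx l seen else tx e :: pvNew tx l (seen ++ [tx e])

lemma bfold {α : Type} (tx : List (String × String) → String) (g : String → α)
    (l : List (List (String × String))) (out : List α) (seen : List String) :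
    l.foldl (fun st ent =>
        if st.2.contains (tx ent) then st else (st.1 ++ [g (tx ent)], st.2 ++ [tx ent]))
      (out, seen)
    = (out ++ (pvNew tx l seen).map g, seen ++ pvNew tx l seen) := by
  induction l generalizing out seen with
  | nil => simp [pvNew]
  | cons e l ih =>
    simp only [List.foldl_cons, pvNew]
    by_cases h : seen.contains (tx e)
    · simp only [h, if_true]; exact ih out seen
    · simp only [h, if_false, Bool.false_eq_true, ih]
      simp

lemma seen_pvNew (tx : List (String × String) → String)
    (l : List (List (String × String))) (seen : List String) :
    seen ++ pvNew tx l seen = PySem.Set.update seen (l.map tx) := by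
  induction l generalizing seen with
  | nil => simp [pvNew, PySem.Set.update]
  | cons e l ih =>
    simp only [pvNew, List.map_cons, PySem.Set.update_cons]
    by_cases h : seen.contains (tx e)
    · have hmem : tx e ∈ seen := by simpa using h
      rw [PySem.Set.add_of_mem hmem]
      simp only [h, if_true]
      exact ih seen
    · have hmem : tx e ∉ seen := by simpa using h
      rw [PySem.Set.add_of_not_mem hmem]
      simp only [h, if_false, Bool.false_eq_true]
      rw [← ih (seen ++ [tx e])]
      simp

-- ===== VERDICT (by name: the statement is the Claim_ definition above) =====
theorem deduplicate_entities_majority_voting_spec : Claim_equal_deduplicate_entities_majority_voting := by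
  intro entities _ _
  unfold Spec_deduplicate_entities_majority_voting
  unfold deduplicate_entities_majority_voting deduplicate_entities_majority_voting_alt
  simp only [PySem.List.foldl_append_singleton_eq_map, List.nil_append]
  -- B's side: characterise the fold
  rw [bfold (tx := fun ent => entGet ent "text")
      (g := fun t =>
        [("text", t), ("label",
          PySem.List.maxD ((entities.filter (fun e => entGet e "text" == t)).map (fun e => entGet e "label"))
            (fun l => (((entities.filter (fun e => entGet e "text" == t)).map (fun e => entGet e "label")).count l : Int)) "")])]
  simp only [List.nil_append]
  have hnew := seen_pvNew (fun ent => entGet ent "text") entities []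
  rw [List.nil_append, PySem.Set.update_nil_left] at hnew
  rw [hnew]
  -- A's side: the grouping dict's items
  set F := fun (d : PySem.Dict String (List String)) ent =>
    d.modify (entGet ent "text") [] (fun ls => ls ++ [entGet ent "label"]) with hF
  have hnd : (entities.foldl F PySem.Dict.empty).keys.Nodup := by
    rw [hF]
    exact PySem.Dict.nodup_keys_foldl_modify_key entities (fun ent => entGet ent "text") []
      (fun _ ent ls => ls ++ [entGet ent "label"]) PySem.Dict.empty (by simp [PySem.Dict.keys_empty])
  have hkeys : (entities.foldl F PySem.Dict.empty).keys = PySem.Set.ofList (entities.map (fun ent => entGet ent "text")) := by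
    rw [hF]
    rw [PySem.Dict.keys_foldl_modify_key entities (fun ent => entGet ent "text") []
      (fun _ ent ls => ls ++ [entGet ent "label"]) PySem.Dict.empty]
    rw [PySem.Dict.keys_empty, PySem.Set.update_nil_left]
  have hgetD : ∀ t, (entities.foldl F PySem.Dict.empty).getD t [] =
      (entities.filter (fun e => entGet e "text" == t)).map (fun e => entGet e "label") := by
    intro t
    have : entities.foldl F PySem.Dict.empty =
        (entities.map (fun e => (entGet e "text", entGet e "label"))).foldl
          (fun d p => d.modify p.1 [] (fun ls => ls ++ [p.2])) PySem.Dict.empty := by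
      rw [List.foldl_map]
    rw [this, PySem.Dict.getD_foldl_modify_append, PySem.Dict.getD_empty, List.nil_append,
      List.filter_map, List.map_map]
    rfl
  rw [PySem.Dict.items_eq_map_keys _ hnd [], hkeys, List.map_map]
  apply List.map_congr_left
  intro t _
  simp only [Function.comp, hgetD t, mostCommon1_eq_maxD]
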